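-- pv_equiv track=rewrite | github.com/laislong314-code/hovenhub | app/services/settlement_service.py | _parse_multi
-- ===== SOURCE A (Python) =====
-- from typing import Optional, Tuple, List, Dict
--
-- def _parse_multi(market: str) -> Optional[List[Tuple[str, str]]]:
--     """
--     MULTI_19467844_BTTS_19427164_BTTS
--       -> [("19467844","BTTS"), ("19427164","BTTS")]
--     MULTI_19425145_Away_19427164_BTTS
--       -> [("19425145","Away"), ("19427164","BTTS")]
--     MULTI_19660914_Over_1.5_19427164_BTTS  (se existir)
--       -> [("19660914","Over_1.5"), ("19427164","BTTS")]
--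
--     Observação: como market pode conter "_" (Over_1.5, DC_Home_Draw),
--     esta função tenta reconstruir as pernas em pares (fixture_id, market_str)
--     usando heurística: fixture_id é sempre numérico.
--     """
--     if not market.startswith("MULTI_"):
--         return None
--     parts = market.split("_")[1:]
--     if len(parts) < 2:
--         return None
--
--     legs: List[Tuple[str, str]] = []
--     i = 0
--     while i < len(parts):
--         fid = parts[i]
--         if not fid.isdigit():
--             return None
--         i += 1
--         if i >= len(parts):
--             return None
--
--         # market token(s) até o próximo token numérico (próximo fixture_id) ou fim
--         m_tokens = []
--         while i < len(parts) and not parts[i].isdigit():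
--             m_tokens.append(parts[i])
--             i += 1
--         if not m_tokens:
--             return None
--         leg_market = "_".join(m_tokens)
--         legs.append((fid, leg_market))
--
--     return legs if legs else None
-- ===== SOURCE B (Python) =====
-- def _parse_multi(market):
--     # Single right-to-left pass: accumulate market tokens until a numeric
--     # fixture-id token is met, which closes a leg.  No index arithmetic.
--     if not market.startswith("MULTI_"):
--         return None
--     parts = market.split("_")[1:]
--     legs = []
--     acc = []
--     for t in reversed(parts):
--         if t.isdigit():
--             if not acc:
--                 return None
--             legs.insert(0, (t, "_".join(acc)))
--             acc = []
--         else: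
--             acc.insert(0, t)
--     if acc:
--         return None
--     return legs if legs else None
-- ===== Notes on version B (the rewrite author's own statement) =====
-- stated objective: alternative
-- what changed: Replaces the forward index-based while-loop state machine (outer cursor plus inner token-collecting while) with a single right-to-left pass folding each token into an (accumulated-market-tokens, legs) state, with no indices and no length check.
import Mathlib
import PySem

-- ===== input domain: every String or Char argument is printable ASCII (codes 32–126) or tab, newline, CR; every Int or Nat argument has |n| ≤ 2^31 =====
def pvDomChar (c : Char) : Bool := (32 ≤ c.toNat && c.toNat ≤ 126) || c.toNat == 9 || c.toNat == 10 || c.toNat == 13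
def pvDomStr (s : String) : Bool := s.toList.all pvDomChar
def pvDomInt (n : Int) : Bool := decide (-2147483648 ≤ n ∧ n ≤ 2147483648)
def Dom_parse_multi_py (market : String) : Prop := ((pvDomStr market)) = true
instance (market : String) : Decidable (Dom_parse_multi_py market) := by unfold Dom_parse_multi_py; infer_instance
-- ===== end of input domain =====

-- B replaces A's forward index-based while-loop state machine by a single right-to-left fold; return value only.

-- ===== PORT A =====
-- the outer while loop of A: fid = parts[i] must be numeric, the inner while collects
-- the following non-numeric tokens, then the loop resumes at the next numeric token
def pvNotDigit (t : String) : Bool := !PySem.Str.strIsdigit t   -- "not parts[i].isdigit()"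

def pvA_loop : List String → Option (List (String × String))
  | [] => some []
  | fid :: rest =>
    if ¬ PySem.Str.strIsdigit fid then none
    else if rest.isEmpty then none          -- "if i >= len(parts): return None"
    else
      let m := rest.takeWhile pvNotDigit
      if m.isEmpty then none                -- "if not m_tokens: return None"
      else
        match pvA_loop (rest.dropWhile pvNotDigit) with
        | none => none
        | some legs => some ((fid, PySem.Str.join "_" m) :: legs)
  termination_by l => l.length
  decreasing_by
    simp only [List.length_cons]
    exact Nat.lt_succ_of_le (List.length_dropWhile_le _ _)

def parse_multi_py (market : String) : Option (List (String × String)) :=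
  if ¬ PySem.Str.startswith market "MULTI_" then none
  else
    let parts := PySem.List.slice ((PySem.Str.split? market "_").getD []) (some 1) none
    if parts.length < 2 then none
    else
      match pvA_loop parts with
      | none => none
      | some legs => if legs.isEmpty then none else some legs   -- "legs if legs else None"

-- ===== PORT B =====
-- one step of B's right-to-left pass over the tokens (state: pending market tokens, legs)
def pvB_step (t : String) (st : Option (List String × List (String × String))) :
    Option (List String × List (String × String)) :=
  match st with
  | none => none
  | some (acc, legs) =>
    if PySem.Str.strIsdigit t then
      match acc with
      | [] => none
      | _ => some ([], (t, PySem.Str.join "_" acc) :: legs)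
    else some (t :: acc, legs)

def parse_multi_py_alt (market : String) : Option (List (String × String)) :=
  if ¬ PySem.Str.startswith market "MULTI_" then none
  else
    let parts := PySem.List.slice ((PySem.Str.split? market "_").getD []) (some 1) none
    match parts.foldr pvB_step (some ([], [])) with
    | none => none
    | some (acc, legs) =>
      if ¬ acc.isEmpty then none
      else if legs.isEmpty then none else some legs

-- ===== PRECONDITION & SPEC =====
def Spec_parse_multi_py (market : String) (out : Option (List (String × String))) : Prop := out = parse_multi_py_alt market
instance (market : String) (out : Option (List (String × String))) : Decidable (Spec_parse_multi_py market out) := by unfold Spec_parse_multi_py; infer_instance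

-- ===== CLAIM (what is proved, stated in full; the proofs are below) =====
def Claim_equal_parse_multi_py : Prop := ∀ (market : String), Dom_parse_multi_py market → Spec_parse_multi_py market (parse_multi_py market)

-- ===== LEMMAS AND PROOFS =====

-- B's fold, characterised through A's loop applied past the leading non-digit tokens
theorem pvB_foldr_eq (l : List String) :
    l.foldr pvB_step (some ([], [])) =
      match pvA_loop (l.dropWhile pvNotDigit) with
      | none => none
      | some legs => some (l.takeWhile pvNotDigit, legs) := by
  induction l with
  | nil => simp [pvA_loop]
  | cons t rest ih =>
    rw [List.foldr_cons, ih]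
    by_cases hd : PySem.Str.strIsdigit t = true
    · have hnd : pvNotDigit t = false := by unfold pvNotDigit; rw [hd]; rfl
      rw [List.dropWhile_cons_of_neg (by rw [hnd]; exact Bool.false_ne_true),
          List.takeWhile_cons_of_neg (by rw [hnd]; exact Bool.false_ne_true)]
      rw [pvA_loop, if_neg (not_not_intro hd)]
      by_cases hre : rest.isEmpty
      · have : rest = [] := List.isEmpty_iff.mp hre
        subst this
        simp only [List.dropWhile_nil, List.takeWhile_nil, pvA_loop, pvB_step, List.isEmpty_nil,
          if_true, hd]
      · rw [if_neg hre]
        cases hres : pvA_loop (rest.dropWhile pvNotDigit) with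
        | none =>
          simp only [pvB_step, ite_self]
        | some legs =>
          simp only [pvB_step, hd, if_true]
          cases rest.takeWhile pvNotDigit with
          | nil => simp
          | cons a as => simp
    · have hnd : pvNotDigit t = true := by
        unfold pvNotDigit
        cases h : PySem.Str.strIsdigit t with
        | true => exact absurd h hd
        | false => rfl
      rw [List.dropWhile_cons_of_pos hnd, List.takeWhile_cons_of_pos hnd]
      cases pvA_loop (rest.dropWhile pvNotDigit) with
      | none => rfl
      | some legs =>
        simp only [pvB_step]
        rw [if_neg hd]

-- a successful pvA_loop on a non-empty list yields non-empty legs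
theorem pvA_loop_ne_nil (fid : String) (rest : List String) (legs : List (String × String))
    (h : pvA_loop (fid :: rest) = some legs) : legs ≠ [] := by
  rw [pvA_loop] at h
  by_cases h1 : ¬ PySem.Str.strIsdigit fid = true
  · rw [if_pos h1] at h; exact absurd h (by simp)
  · rw [if_neg h1] at h
    by_cases h2 : rest.isEmpty
    · rw [if_pos h2] at h; exact absurd h (by simp)
    · rw [if_neg h2] at h
      by_cases h3 : (rest.takeWhile pvNotDigit).isEmpty
      · rw [if_pos h3] at h; exact absurd h (by simp)
      · rw [if_neg h3] at h
        cases hres : pvA_loop (rest.dropWhile pvNotDigit) with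
        | none => rw [hres] at h; exact absurd h (by simp)
        | some l' =>
          rw [hres] at h
          cases h
          simp

-- the two top-level wrappers agree on every token list
theorem pv_body_eq (parts : List String) :
    (if parts.length < 2 then none
     else match pvA_loop parts with
          | none => none
          | some legs => if legs.isEmpty then none else some legs) =
    (match parts.foldr pvB_step (some ([], [])) with
     | none => none
     | some (acc, legs) =>
       if ¬ acc.isEmpty then none
       else if legs.isEmpty then none else some legs :
       Option (List (String × String))) := by
  rw [pvB_foldr_eq]
  cases parts with
  | nil => simp [pvA_loop]
  | cons t rest =>
    by_cases hd : PySem.Str.strIsdigit t = true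
    · have hnd : pvNotDigit t = false := by unfold pvNotDigit; rw [hd]; rfl
      rw [List.dropWhile_cons_of_neg (by rw [hnd]; exact Bool.false_ne_true),
          List.takeWhile_cons_of_neg (by rw [hnd]; exact Bool.false_ne_true)]
      cases hres : pvA_loop (t :: rest) with
      | none =>
        split <;> rfl
      | some legs =>
        have hne : legs ≠ [] := pvA_loop_ne_nil t rest legs hres
        have hlen : ¬ (t :: rest).length < 2 := by
          rcases rest with _ | ⟨a, as⟩
          · rw [pvA_loop, if_neg (not_not_intro hd), if_pos (by rfl)] at hres
            exact absurd hres (by simp)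
          · simp
        rw [if_neg hlen]
        simp
    · -- leading non-digit token: pvA_loop returns none and B's pending acc is non-empty
      have hA : pvA_loop (t :: rest) = none := by
        rw [pvA_loop, if_pos hd]
      have hnd : pvNotDigit t = true := by
        unfold pvNotDigit
        cases h : PySem.Str.strIsdigit t with
        | true => exact absurd h hd
        | false => rfl
      rw [List.dropWhile_cons_of_pos hnd, List.takeWhile_cons_of_pos hnd]
      cases pvA_loop (rest.dropWhile pvNotDigit) with
      | none =>
        simp only [hA]
        split <;> rfl
      | some legs =>
        by_cases hlen : (t :: rest).length < 2
        · rw [if_pos hlen]; rfl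
        · rw [if_neg hlen]
          simp only [hA]
          rfl

-- ===== VERDICT (by name: the statement is the Claim_ definition above) =====
theorem parse_multi_py_spec : Claim_equal_parse_multi_py := by
  intro market _
  unfold Spec_parse_multi_py parse_multi_py parse_multi_py_alt
  by_cases hs : ¬ PySem.Str.startswith market "MULTI_" = true
  · rw [if_pos hs, if_pos hs]
  · rw [if_neg hs, if_neg hs]
    exact pv_body_eq _
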